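-- pv_equiv track=rewrite | github.com/jatman2002/UoB.Y4.Dissertation | src/ModelTesting/ModelClasses/Model.py | get_wasted_slots
-- ===== SOURCE A (Python) =====
-- def get_wasted_slots(diary):
--     min_booking_length = 6
--     wasted_count = 0
--     for table in diary:
--         empty_slots = 0
--         for slot in table:
--             if slot != 0:
--                 if empty_slots < min_booking_length and empty_slots > 0:
--                     wasted_count += 1
--                 empty_slots = 0
--                 continue
--             empty_slots += 1
--
--     return wasted_count
-- ===== SOURCE B (Python) =====
-- def get_wasted_slots(diary):
--     total = 0
--     for table in diary:
--         # build run-length groups: (is_empty, length) in order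
--         runs = []
--         i = 0
--         n = len(table)
--         while i < n:
--             key = (table[i] == 0)
--             j = i + 1
--             while j < n and (table[j] == 0) == key:
--                 j += 1
--             runs.append((key, j - i))
--             i = j
--         # count empty runs of length 1..5 that are followed by a booking run
--         total += sum(1 for key, length in runs[:-1] if key and 1 <= length <= 5)
--     return total
-- ===== Notes on version B (the rewrite author's own statement) =====
-- stated objective: alternative
-- what changed: B replaces A's rolling empty-slot counter with an explicit run-length grouping per table, then counts empty runs of length 1..5 that are not the table's final run.
import Mathlib
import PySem

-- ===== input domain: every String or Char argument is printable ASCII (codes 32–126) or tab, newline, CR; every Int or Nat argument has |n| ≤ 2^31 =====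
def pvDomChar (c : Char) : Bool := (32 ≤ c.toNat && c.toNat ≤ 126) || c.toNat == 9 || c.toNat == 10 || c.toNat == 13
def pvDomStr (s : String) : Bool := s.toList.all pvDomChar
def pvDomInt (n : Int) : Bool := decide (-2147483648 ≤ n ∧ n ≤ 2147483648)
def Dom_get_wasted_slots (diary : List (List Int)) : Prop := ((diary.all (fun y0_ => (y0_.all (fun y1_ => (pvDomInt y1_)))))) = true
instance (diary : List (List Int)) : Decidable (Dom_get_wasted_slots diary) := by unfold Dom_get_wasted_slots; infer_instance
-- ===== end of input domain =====

-- B replaces A's rolling empty-slot counter with explicit run-length grouping per table,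
-- then counts empty runs of length 1..5 that are not the table's final run (objective: alternative).

-- ===== PORT A =====
-- inner-loop step of A: state (empty_slots, wasted_count)
def pvStepA (st : Int × Int) (slot : Int) : Int × Int :=
  if slot ≠ 0 then
    (0, st.2 + (if st.1 < 6 ∧ st.1 > 0 then 1 else 0))
  else
    (st.1 + 1, st.2)

def get_wasted_slots (diary : List (List Int)) : Int :=
  diary.foldl (fun wasted_count table =>
    (table.foldl pvStepA (0, wasted_count)).2) 0

-- ===== PORT B =====
-- the run-length groups of a table: (is_empty, length) pairs; each recursive step
-- consumes exactly one run, mirroring Source B's outer while loop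
def pvRuns : List Int → List (Bool × Int)
  | [] => []
  | x :: xs =>
    let key := (x == 0)
    let p := xs.span (fun y => ((y == 0) == key))
    (key, 1 + (p.1.length : Int)) :: pvRuns p.2
  termination_by t => t.length
  decreasing_by
    simp only [List.span_eq_takeWhile_dropWhile]
    have := List.length_dropWhile_le (p := fun y => ((y == 0) == (x == 0))) (l := xs)
    simpa using Nat.lt_succ_of_le this

def pvGoodRun (r : Bool × Int) : Bool := r.1 && (decide (1 ≤ r.2) && decide (r.2 ≤ 5))

def get_wasted_slots_alt (diary : List (List Int)) : Int :=
  diary.foldl (fun total table =>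
    total + ((pvRuns table).dropLast.countP pvGoodRun : Int)) 0

-- ===== PRECONDITION & SPEC =====
def Spec_get_wasted_slots (diary : List (List Int)) (out : Int) : Prop := out = get_wasted_slots_alt diary
instance (diary : List (List Int)) (out : Int) : Decidable (Spec_get_wasted_slots diary out) := by unfold Spec_get_wasted_slots; infer_instance

-- ===== CLAIM (what is proved, stated in full; the proofs are below) =====
def Claim_equal_get_wasted_slots : Prop := ∀ (diary : List (List Int)), Dom_get_wasted_slots diary → Spec_get_wasted_slots diary (get_wasted_slots diary)

-- ===== LEMMAS AND PROOFS =====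

-- A's per-table count started from empty_slots = e and wasted_count = 0
def pvF (e : Int) (t : List Int) : Int := (t.foldl pvStepA (e, 0)).2

-- B's per-table count
def pvG (t : List Int) : Int := ((pvRuns t).dropLast.countP pvGoodRun : Int)

-- the inner fold's wasted_count accumulator is additive
theorem pvFoldA_add (t : List Int) : ∀ (e w : Int),
    t.foldl pvStepA (e, w) = ((t.foldl pvStepA (e, 0)).1, w + (t.foldl pvStepA (e, 0)).2) := by
  induction t with
  | nil => intro e w; simp
  | cons x xs ih =>
    intro e w
    simp only [List.foldl_cons, pvStepA]
    by_cases h : x ≠ 0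
    · rw [if_pos h, if_pos h,
        ih 0 (w + (if e < 6 ∧ e > 0 then 1 else 0)),
        ih 0 (0 + (if e < 6 ∧ e > 0 then 1 else 0))]
      simp only [Prod.mk.injEq, true_and]
      ring
    · rw [if_neg h, if_neg h, ih (e + 1) w, ih (e + 1) 0]

theorem pvF_cons_nz (e : Int) (x : Int) (hx : x ≠ 0) (t : List Int) :
    pvF e (x :: t) = (if e < 6 ∧ e > 0 then 1 else 0) + pvF 0 t := by
  have h : pvStepA (e, 0) x = (0, 0 + (if e < 6 ∧ e > 0 then 1 else 0)) := by
    simp only [pvStepA, if_pos hx]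
  unfold pvF
  rw [List.foldl_cons, h, pvFoldA_add]
  simp

theorem pvF_cons_z (e : Int) (t : List Int) : pvF e ((0:Int) :: t) = pvF (e + 1) t := by
  simp [pvF, pvStepA]

-- skipping a zero prefix just raises the counter
theorem pvF_zeros (pre : List Int) : ∀ (e : Int) (rest : List Int),
    (∀ y ∈ pre, y = 0) → pvF e (pre ++ rest) = pvF (e + pre.length) rest := by
  induction pre with
  | nil => intro e rest _; simp
  | cons x xs ih =>
    intro e rest h
    have hx : x = 0 := h x (by simp)
    subst hx
    rw [List.cons_append, pvF_cons_z, ih (e + 1) rest (fun y hy => h y (by simp [hy]))]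
    congr 1
    simp
    ring

-- a nonzero prefix from counter 0 contributes nothing
theorem pvF_nonzeros (pre : List Int) : ∀ (rest : List Int),
    (∀ y ∈ pre, y ≠ 0) → pvF 0 (pre ++ rest) = pvF 0 rest := by
  induction pre with
  | nil => intro rest _; simp
  | cons x xs ih =>
    intro rest h
    have hx : x ≠ 0 := h x (by simp)
    rw [List.cons_append, pvF_cons_nz 0 x hx, ih rest (fun y hy => h y (by simp [hy]))]
    simp

theorem pvRuns_ne_nil (y : Int) (ys : List Int) : pvRuns (y :: ys) ≠ [] := by
  rw [pvRuns]; simp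

-- main per-table lemma
theorem pvFG (n : ℕ) : ∀ (t : List Int), t.length ≤ n → pvF 0 t = pvG t := by
  induction n with
  | zero =>
    intro t ht
    have ht0 : t = [] := List.eq_nil_of_length_eq_zero (Nat.le_zero.mp ht)
    subst ht0; simp [pvF, pvG, pvRuns]
  | succ n ih =>
    intro t ht
    match t with
    | [] => simp [pvF, pvG, pvRuns]
    | x :: xs =>
      obtain ⟨pre, rest, hpre, hrest⟩ :
          ∃ pre rest : List Int,
            xs.takeWhile (fun y => ((y == 0) == (x == 0))) = pre ∧
            xs.dropWhile (fun y => ((y == 0) == (x == 0))) = rest := ⟨_, _, rfl, rfl⟩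
      have hspan := List.span_eq_takeWhile_dropWhile (p := fun y => ((y == 0) == (x == 0))) (l := xs)
      rw [hpre, hrest] at hspan
      have hxs : xs = pre ++ rest := by
        rw [← hpre, ← hrest]; exact (List.takeWhile_append_dropWhile).symm
      have hlen_rest : rest.length ≤ xs.length := by
        rw [← hrest]; exact List.length_dropWhile_le _ _
      have hxlen : xs.length ≤ n := by simpa using ht
      have hruns : pvRuns (x :: xs) = ((x == 0), 1 + (pre.length : Int)) :: pvRuns rest := by
        rw [pvRuns]; simp only [hspan]
      have hG2 : pvG (x :: xs) =
          ((((x == 0), 1 + (pre.length : Int)) :: pvRuns rest).dropLast.countP pvGoodRun : Int) := by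
        simp only [pvG, hruns]
      by_cases hx : x = 0
      · subst hx
        have hpre0 : ∀ y ∈ pre, y = 0 := by
          intro y hy
          rw [← hpre] at hy
          have hmem := List.mem_takeWhile_imp hy
          simpa using hmem
        have h1 : pvF 0 ((0 : Int) :: xs) = pvF (1 + pre.length) rest := by
          rw [pvF_cons_z, hxs, show (0 : Int) + 1 = 1 from by ring,
            pvF_zeros pre 1 rest hpre0]
        rw [h1, hG2]
        cases hr : rest with
        | nil => simp [pvF, pvRuns]
        | cons y ys =>
          have hy0 : y ≠ 0 := by
            have hhead := List.head?_dropWhile_not (p := fun z => ((z == 0) == ((0 : Int) == 0))) (l := xs)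
            rw [hrest, hr] at hhead
            simpa using hhead
          have hFrest : pvF 0 (y :: ys) = pvF 0 ys := by
            rw [pvF_cons_nz 0 y hy0]; simp
          have hih : pvF 0 (y :: ys) = pvG (y :: ys) := by
            apply ih
            have hlen2 : (y :: ys).length ≤ xs.length := by rw [← hr]; exact hlen_rest
            simp only [List.length_cons] at hlen2 ⊢
            omega
          rw [pvF_cons_nz _ y hy0, ← hFrest, hih]
          have hne : pvRuns (y :: ys) ≠ [] := pvRuns_ne_nil y ys
          simp only [pvG]
          rw [List.dropLast_cons_of_ne_nil hne, List.countP_cons]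
          have hm0 : (0 : Int) ≤ (pre.length : Int) := Int.natCast_nonneg _
          by_cases h5 : (1 + (pre.length : Int)) ≤ 5
          · have hgood : pvGoodRun (((0 : Int) == 0), 1 + (pre.length : Int)) = true := by
              simp [pvGoodRun]; omega
            have hc : (1 + (pre.length : Int)) < 6 ∧ (1 + (pre.length : Int)) > 0 := by omega
            rw [if_pos hc]
            simp only [hgood]
            push_cast
            ring
          · have hgood : pvGoodRun (((0 : Int) == 0), 1 + (pre.length : Int)) = false := by
              simp [pvGoodRun]; omega
            have hc : ¬ ((1 + (pre.length : Int)) < 6 ∧ (1 + (pre.length : Int)) > 0) := by omega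
            rw [if_neg hc]
            simp only [hgood]
            push_cast
            ring
      · have hpreNZ : ∀ y ∈ pre, y ≠ 0 := by
          intro y hy h0
          rw [← hpre] at hy
          have hmem := List.mem_takeWhile_imp hy
          rw [h0] at hmem
          simp at hmem
          exact hx hmem
        have h1 : pvF 0 (x :: xs) = pvF 0 rest := by
          rw [pvF_cons_nz 0 x hx, hxs, pvF_nonzeros pre rest hpreNZ]
          simp
        rw [h1, hG2]
        have hxfalse : (x == 0) = false := by simp [hx]
        cases hr : rest with
        | nil => simp [pvF, pvRuns]
        | cons y ys =>
          have hih : pvF 0 (y :: ys) = pvG (y :: ys) := by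
            apply ih
            have hlen2 : (y :: ys).length ≤ xs.length := by rw [← hr]; exact hlen_rest
            simp only [List.length_cons] at hlen2 ⊢
            omega
          rw [hih]
          have hne : pvRuns (y :: ys) ≠ [] := pvRuns_ne_nil y ys
          simp only [pvG]
          rw [List.dropLast_cons_of_ne_nil hne, List.countP_cons]
          have hgood : pvGoodRun ((x == 0), 1 + (pre.length : Int)) = false := by
            simp [pvGoodRun, hxfalse]
          simp [hgood]

theorem pvFG_all (t : List Int) : pvF 0 t = pvG t := pvFG t.length t le_rfl

theorem pvOuterEq (diary : List (List Int)) : ∀ (a : Int),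
    diary.foldl (fun wasted_count table => (table.foldl pvStepA (0, wasted_count)).2) a =
    diary.foldl (fun total table => total + ((pvRuns table).dropLast.countP pvGoodRun : Int)) a := by
  induction diary with
  | nil => intro a; rfl
  | cons t ds ih =>
    intro a
    simp only [List.foldl_cons]
    have hG := pvFG_all t
    simp only [pvF, pvG] at hG
    rw [pvFoldA_add t 0 a, hG, ih]

-- ===== VERDICT (by name: the statement is the Claim_ definition above) =====
theorem get_wasted_slots_spec : Claim_equal_get_wasted_slots := by
  intro diary _
  unfold Spec_get_wasted_slots get_wasted_slots get_wasted_slots_alt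
  exact pvOuterEq diary 0
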